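-- pv_equiv track=rewrite | github.com/jcarter62/getabbflow | abbflow/__init__.py | get_first_word
-- ===== SOURCE A (Python) =====
-- def get_first_word(s):
--     result = ''
--     numchars = ['-', '+', '.', '0', '1', '2', '3', '4', '5', '6', '7', '8', '9', ]
--     ptr = 0
--     while (ptr < len(s)) and (s[ptr] in numchars):
--         result = result + s[ptr]
--         ptr += 1
--
--     return result
-- ===== SOURCE B (Python) =====
-- import re
--
-- def get_first_word(s):
--     return re.match(r'[-+.0-9]*', s).group(0)
-- ===== Notes on version B (the rewrite author's own statement) =====
-- stated objective: idiomatic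
-- what changed: Replaced the index-pointer while loop with string concatenation by a single regex match of the leading run of [-+.0-9] characters.
import Mathlib
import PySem

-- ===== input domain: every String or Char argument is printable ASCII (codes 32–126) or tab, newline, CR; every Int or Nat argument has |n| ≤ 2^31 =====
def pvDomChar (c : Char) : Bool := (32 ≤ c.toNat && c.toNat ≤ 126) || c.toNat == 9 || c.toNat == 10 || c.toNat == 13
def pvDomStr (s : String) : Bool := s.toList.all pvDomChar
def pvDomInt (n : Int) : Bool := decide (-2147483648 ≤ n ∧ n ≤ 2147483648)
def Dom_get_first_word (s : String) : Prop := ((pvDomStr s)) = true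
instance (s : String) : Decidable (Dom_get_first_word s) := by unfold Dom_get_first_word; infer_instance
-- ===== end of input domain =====

-- B replaces A's index-pointer while loop with string concatenation by a single regex match
-- `re.match(r'[-+.0-9]*', s).group(0)` (ported as takeWhile over the character class); objective: idiomatic.

-- ===== PORT A =====
-- A's literal list of numeric characters
def numchars : List Char := ['-', '+', '.', '0', '1', '2', '3', '4', '5', '6', '7', '8', '9']

-- A's while loop: walk the characters from the front, appending each numeric char to `result`,
-- stopping at the first non-numeric char (or the end of the string).
def getFirstWordLoop (cs : List Char) (result : String) : String :=
  match cs with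
  | [] => result
  | c :: rest => if numchars.contains c then getFirstWordLoop rest (result.push c) else result

def get_first_word (s : String) : String := getFirstWordLoop s.toList ""

-- ===== PORT B =====
-- the regex character class [-+.0-9]
def isNumChar (c : Char) : Bool := c == '-' || c == '+' || c == '.' || ('0' ≤ c && c ≤ '9')

-- re.match(r'[-+.0-9]*', s).group(0): the maximal leading run of class characters
def get_first_word_alt (s : String) : String := String.ofList (s.toList.takeWhile isNumChar)

-- ===== PRECONDITION & SPEC =====
def Spec_get_first_word (s : String) (out : String) : Prop := out = get_first_word_alt s
instance (s : String) (out : String) : Decidable (Spec_get_first_word s out) := by unfold Spec_get_first_word; infer_instance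

-- ===== CLAIM (what is proved, stated in full; the proofs are below) =====
def Claim_equal_get_first_word : Prop := ∀ (s : String), Dom_get_first_word s → Spec_get_first_word s (get_first_word s)

-- ===== LEMMAS AND PROOFS =====

theorem str_eq_of_toList {a b : String} (h : a.toList = b.toList) : a = b := by
  have := congrArg String.ofList h
  simpa using this

-- A's membership test in its literal char list agrees with B's regex character class.
theorem contains_eq_isNumChar (c : Char) : numchars.contains c = isNumChar c := by
  rw [Bool.eq_iff_iff]
  simp only [numchars, isNumChar, List.contains_cons, List.contains_nil, Bool.or_false,
    Bool.or_eq_true, Bool.and_eq_true, beq_iff_eq, decide_eq_true_eq]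
  constructor
  · rintro (rfl|rfl|rfl|rfl|rfl|rfl|rfl|rfl|rfl|rfl|rfl|rfl|rfl) <;> decide
  · rintro (((rfl|rfl)|rfl)|⟨h1, h2⟩)
    · exact Or.inl rfl
    · exact Or.inr (Or.inl rfl)
    · exact Or.inr (Or.inr (Or.inl rfl))
    · rw [Char.le_def, UInt32.le_iff_toNat_le] at h1 h2
      have h1' : (48 : Nat) ≤ c.toNat := h1
      have h2' : c.toNat ≤ 57 := h2
      have hd : c.toNat = 48 ∨ c.toNat = 49 ∨ c.toNat = 50 ∨ c.toNat = 51 ∨ c.toNat = 52 ∨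
          c.toNat = 53 ∨ c.toNat = 54 ∨ c.toNat = 55 ∨ c.toNat = 56 ∨ c.toNat = 57 := by omega
      rcases hd with h|h|h|h|h|h|h|h|h|h
      · have hc : c = '0' := Char.ext (UInt32.toNat_inj.mp h); subst hc; decide
      · have hc : c = '1' := Char.ext (UInt32.toNat_inj.mp h); subst hc; decide
      · have hc : c = '2' := Char.ext (UInt32.toNat_inj.mp h); subst hc; decide
      · have hc : c = '3' := Char.ext (UInt32.toNat_inj.mp h); subst hc; decide
      · have hc : c = '4' := Char.ext (UInt32.toNat_inj.mp h); subst hc; decide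
      · have hc : c = '5' := Char.ext (UInt32.toNat_inj.mp h); subst hc; decide
      · have hc : c = '6' := Char.ext (UInt32.toNat_inj.mp h); subst hc; decide
      · have hc : c = '7' := Char.ext (UInt32.toNat_inj.mp h); subst hc; decide
      · have hc : c = '8' := Char.ext (UInt32.toNat_inj.mp h); subst hc; decide
      · have hc : c = '9' := Char.ext (UInt32.toNat_inj.mp h); subst hc; decide

-- A's loop, started with accumulator `acc`, returns `acc` followed by the leading numeric run.
theorem getFirstWordLoop_eq (cs : List Char) (acc : String) :
    getFirstWordLoop cs acc = acc ++ String.ofList (cs.takeWhile isNumChar) := by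
  induction cs generalizing acc with
  | nil => apply str_eq_of_toList; simp [getFirstWordLoop]
  | cons c rest ih =>
      rw [getFirstWordLoop, contains_eq_isNumChar]
      by_cases h : isNumChar c
      · rw [if_pos h, ih, List.takeWhile_cons_of_pos h]
        apply str_eq_of_toList
        simp
      · rw [if_neg h, List.takeWhile_cons_of_neg h]
        apply str_eq_of_toList
        simp

-- ===== VERDICT (by name: the statement is the Claim_ definition above) =====
theorem get_first_word_spec : Claim_equal_get_first_word := by
  intro s _
  unfold Spec_get_first_word get_first_word get_first_word_alt
  rw [getFirstWordLoop_eq]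
  apply str_eq_of_toList
  simp
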